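-- pv_equiv track=rewrite | github.com/EmanuelML64/ayed-2025-tps | TP4/# TP 4 Ejercicio 11.py | contar_subcadena
-- ===== SOURCE A (Python) =====
-- def contar_subcadena(cadena: str, subcadena: str) -> int:
--     '''
--     Cuenta cuantas veces aparece una subcadena dentro de una cadena,
--     sin diferenciar mayusculas y minusculas. Los caracteres de la
--     subcadena no necesariamente deben ser consecutivos, pero sí deben
--     respetar el orden.
--
--     Precondiciones:
--     cadena y subcadena son cadenas de caracteres no vacias.
--
--
--     Poscondiciones:
--     Devuelve un numero entero ≥ 0 que representa la cantidad de
--       veces que la subcadena puede encontrarse respetando el orden.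
--     '''
--
--     cadena = cadena.lower()
--     subcadena = subcadena.lower()
--
--     i = 0
--     contador = 0
--
--     for caracter in cadena:
--         if caracter == subcadena[i]:
--             i += 1
--             if i == len(subcadena):
--                 contador += 1
--                 i = 0
--
--     return contador
-- ===== SOURCE B (Python) =====
-- def contar_subcadena(cadena: str, subcadena: str) -> int:
--     # Nested decomposition: per-match attempt, per-character forward scan via str.find.
--     s = cadena.lower()
--     t = subcadena.lower()
--     contador = 0
--     pos = 0
--     while True:
--         for c in t:
--             p = s.find(c, pos)
--             if p < 0:
--                 return contador
--             pos = p + 1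
--         contador += 1
-- ===== Notes on version B (the rewrite author's own statement) =====
-- stated objective: alternative
-- what changed: A is one flat pass comparing each character against subcadena[i] with manual index/reset bookkeeping; B is restructured as an outer loop counting completed matches, each attempt scanning subcadena and locating every character with str.find(c, pos).
-- outside the precondition, e.g. on contar_subcadena('', ''): A returns 0, B does not finish within the time limit
import Mathlib
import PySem

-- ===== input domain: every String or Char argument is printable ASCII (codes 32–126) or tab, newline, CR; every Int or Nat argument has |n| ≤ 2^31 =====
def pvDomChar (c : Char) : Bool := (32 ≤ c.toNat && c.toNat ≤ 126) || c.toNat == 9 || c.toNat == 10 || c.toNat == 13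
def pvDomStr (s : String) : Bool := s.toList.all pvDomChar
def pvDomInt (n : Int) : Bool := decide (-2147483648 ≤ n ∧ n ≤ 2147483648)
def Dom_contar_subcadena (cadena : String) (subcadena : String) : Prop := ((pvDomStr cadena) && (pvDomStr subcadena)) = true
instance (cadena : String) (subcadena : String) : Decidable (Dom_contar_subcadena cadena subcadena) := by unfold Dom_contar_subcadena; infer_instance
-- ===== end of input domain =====

-- B restructures A's flat indexed scan into an outer per-match loop whose inner loop locates each
-- subsequence character with str.find(c, pos); same return value on Pre_ (alternative decomposition).


-- ===== PORT A =====
-- A's for-loop over the lowered cadena with state (i, contador), as the obvious structural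
-- recursion on the char list. Python's 'caracter == subcadena[i]' raises IndexError when
-- subcadena = '' and cadena ≠ '' (excluded by Pre_); the port's 't[i]?' is exact whenever
-- 0 ≤ i < t.length, which A's loop maintains on Pre_ (i is reset to 0 on reaching t.length).
def pvLoopA (t : List Char) : List Char → Nat → Int → Int
  | [], _, cnt => cnt
  | c :: s, i, cnt =>
    if t[i]? = some c then
      (if i + 1 = t.length then pvLoopA t s 0 (cnt + 1) else pvLoopA t s (i + 1) cnt)
    else pvLoopA t s i cnt

def contar_subcadena (cadena : String) (subcadena : String) : Int :=
  pvLoopA (PySem.Str.lower subcadena).toList (PySem.Str.lower cadena).toList 0 0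

-- ===== PORT B =====
-- Source B's inner 'for c in t' loop: advance pos with s.find(c, pos); none = the early 'return contador'.
def pvMatchB (s : List Char) : List Char → Nat → Option Nat
  | [], pos => some pos
  | c :: tr, pos =>
    let p := PySem.Chars.findFrom s [c] (pos : Int)
    if p < 0 then none else pvMatchB s tr (p.toNat + 1)

-- Source B's 'while True' outer loop. Python needs no fuel; the fuel only makes the port total:
-- on Pre_ (t ≠ []) each completed match advances pos by at least one, so s.length + 1 rounds
-- are never exhausted (the equivalence proof below shows this).
def pvOuterB (s t : List Char) : Nat → Nat → Int → Int
  | 0, _, cnt => cnt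
  | fuel + 1, pos, cnt =>
    match pvMatchB s t pos with
    | none => cnt
    | some pos' => pvOuterB s t fuel pos' (cnt + 1)

def contar_subcadena_alt (cadena : String) (subcadena : String) : Int :=
  let s := (PySem.Str.lower cadena).toList
  let t := (PySem.Str.lower subcadena).toList
  pvOuterB s t (s.length + 1) 0 0

-- ===== PRECONDITION & SPEC =====
-- Pre_ excludes only empty subcadena: there A raises IndexError whenever cadena is nonempty
-- (and returns 0 only in the degenerate both-empty case), while B's rescan loop never terminates.
def Pre_contar_subcadena (cadena : String) (subcadena : String) : Prop := subcadena ≠ ""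
instance (cadena : String) (subcadena : String) : Decidable (Pre_contar_subcadena cadena subcadena) := by unfold Pre_contar_subcadena; infer_instance
def pvWitness_contar_subcadena : String × String := ("aAbB", "Ab")

def Spec_contar_subcadena (cadena : String) (subcadena : String) (out : Int) : Prop := out = contar_subcadena_alt cadena subcadena
instance (cadena : String) (subcadena : String) (out : Int) : Decidable (Spec_contar_subcadena cadena subcadena out) := by unfold Spec_contar_subcadena; infer_instance

-- ===== CLAIM (what is proved, stated in full; the proofs are below) =====
def Claim_equal_contar_subcadena : Prop := ∀ (cadena : String) (subcadena : String), Dom_contar_subcadena cadena subcadena → Pre_contar_subcadena cadena subcadena → Spec_contar_subcadena cadena subcadena (contar_subcadena cadena subcadena)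

-- ===== LEMMAS AND PROOFS =====

lemma pv_go_shift (sub : List Char) : ∀ (s : List Char) (k : Nat),
    PySem.Chars.find.go sub s (k + 1) =
      (if PySem.Chars.find s sub = -1 then -1 else PySem.Chars.find s sub + (k + 1)) := by
  intro s
  induction s with
  | nil =>
    intro k
    by_cases h : sub.isEmpty
    · simp [PySem.Chars.find, PySem.Chars.find.go, h]
    · simp [PySem.Chars.find, PySem.Chars.find.go, h]
  | cons a s ih =>
    intro k
    simp only [PySem.Chars.find.go, PySem.Chars.find]
    by_cases h : sub.isPrefixOf (a :: s) = true
    · simp [h]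
    · simp only [h, if_false]
      rw [ih (k + 1), show PySem.Chars.find.go sub s 1 = PySem.Chars.find.go sub s (0 + 1) by ring_nf,
        ih 0]
      have hge := PySem.Chars.neg_one_le_find s sub
      by_cases h2 : PySem.Chars.find s sub = -1
      · simp [h2]
      · simp only [h2, if_false]
        split_ifs <;> (push_cast at * <;> omega)
lemma pv_find_cons (a c : Char) (s : List Char) :
    PySem.Chars.find (a :: s) [c] =
      if c = a then 0
      else (if PySem.Chars.find s [c] = -1 then -1 else PySem.Chars.find s [c] + 1) := by
  simp only [PySem.Chars.find, PySem.Chars.find.go, List.isPrefixOf]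
  by_cases h : c = a
  · simp [h]
  · have hba : (c == a) = false := by simp [h]
    simp only [hba, Bool.false_and, if_false, h]
    rw [show (1 : Nat) = 0 + 1 by rfl, pv_go_shift]
    simp [PySem.Chars.find]

def pvMatchL : List Char → List Char → Option (List Char)
  | resto, [] => some resto
  | resto, c :: tr =>
    let p := PySem.Chars.find resto [c]
    if p < 0 then none else pvMatchL (resto.drop (p.toNat + 1)) tr

lemma pv_find_nonneg_lt (s : List Char) (c : Char) (h : 0 ≤ PySem.Chars.find s [c]) :
    (PySem.Chars.find s [c]).toNat < s.length := by
  obtain ⟨hpre, -⟩ := PySem.Chars.find_spec (s := s) (sub := [c]) h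
  have := hpre.length_le
  simp at this
  have hle := PySem.Chars.find_le_length s [c]
  omega

lemma pv_matchB_eq_matchL (s : List Char) : ∀ (tr : List Char) (pos : Nat), pos ≤ s.length →
    pvMatchB s tr pos = (pvMatchL (s.drop pos) tr).map (fun r => s.length - r.length) := by
  intro tr
  induction tr with
  | nil =>
    intro pos hpos
    simp [pvMatchB, pvMatchL]
    omega
  | cons c tr ih =>
    intro pos hpos
    simp only [pvMatchB, pvMatchL]
    rw [PySem.Chars.findFrom_natCast s [c] pos hpos]
    set p2 := PySem.Chars.find (s.drop pos) [c] with hp2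
    have hge : -1 ≤ p2 := PySem.Chars.neg_one_le_find _ _
    by_cases h : p2 = -1
    · simp [h]
    · have hpos2 : 0 ≤ p2 := by omega
      have hlt : p2.toNat < (s.drop pos).length := pv_find_nonneg_lt _ _ hpos2
      rw [List.length_drop] at hlt
      simp only [h, if_false]
      have hnn : ¬ ((pos : Int) + p2 < 0) := by omega
      have hnn2 : ¬ (p2 < 0) := by omega
      simp only [hnn, if_false, hnn2]
      have htn : ((pos : Int) + p2).toNat = pos + p2.toNat := by omega
      rw [htn, ih (pos + p2.toNat + 1) (by omega)]
      rw [List.drop_drop]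
      have harg : pos + p2.toNat + 1 = pos + (p2.toNat + 1) := by omega
      rw [harg]

lemma pv_matchL_suffix : ∀ (tr s r : List Char), pvMatchL s tr = some r → r <:+ s := by
  intro tr
  induction tr with
  | nil => intro s r h; simp [pvMatchL] at h; simp [h]
  | cons c tr ih =>
    intro s r h
    simp only [pvMatchL] at h
    by_cases hc : PySem.Chars.find s [c] < 0
    · simp [hc] at h
    · simp only [hc, if_false] at h
      exact (ih _ _ h).trans (List.drop_suffix _ _)

lemma pv_matchL_shrink : ∀ (tr s r : List Char) (c : Char),
    pvMatchL s (c :: tr) = some r → r.length < s.length := by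
  intro tr
  induction tr with
  | nil =>
    intro s r c h
    simp only [pvMatchL] at h
    by_cases hc : PySem.Chars.find s [c] < 0
    · simp [hc] at h
    · simp only [hc, if_false] at h
      simp only [pvMatchL, Option.some.injEq] at h
      have hlt := pv_find_nonneg_lt s c (by omega)
      subst h
      rw [List.length_drop]
      omega
  | cons c2 tr ih =>
    intro s r c h
    simp only [pvMatchL] at h
    by_cases hc : PySem.Chars.find s [c] < 0
    · simp [hc] at h
    · simp only [hc, if_false] at h
      have h2 := ih _ _ _ h
      rw [List.length_drop] at h2
      have hlt := pv_find_nonneg_lt s c (by omega)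
      omega

lemma pv_matchL_cons_eq (c : Char) (s tr : List Char) :
    pvMatchL (c :: s) (c :: tr) = pvMatchL s tr := by
  simp [pvMatchL, pv_find_cons]

lemma pv_matchL_cons_ne {c a : Char} (h : c ≠ a) (s tr : List Char) :
    pvMatchL (a :: s) (c :: tr) = pvMatchL s (c :: tr) := by
  simp only [pvMatchL, pv_find_cons, h, if_false]
  set p2 := PySem.Chars.find s [c] with hp2
  have hge : -1 ≤ p2 := PySem.Chars.neg_one_le_find _ _
  by_cases h2 : p2 = -1
  · simp [h2]
  · have hnn : ¬ (p2 + 1 < 0) := by omega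
    have h2' : ¬ (p2 < 0) := by omega
    simp only [h2, if_false, hnn, h2', if_false]
    rw [List.drop_succ_cons]
    congr 2
    omega

lemma pv_core (t : List Char) : ∀ (s : List Char) (i : Nat) (cnt : Int), i < t.length →
    pvLoopA t s i cnt =
      (match pvMatchL s (t.drop i) with
       | none => cnt
       | some r => pvLoopA t r 0 (cnt + 1)) := by
  intro s
  induction s with
  | nil =>
    intro i cnt hi
    rw [List.drop_eq_getElem_cons hi]
    simp [pvLoopA, pvMatchL, PySem.Chars.find, PySem.Chars.find.go]
  | cons a s ih =>
    intro i cnt hi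
    have hdrop : t.drop i = t[i] :: t.drop (i + 1) := List.drop_eq_getElem_cons hi
    rw [hdrop]
    by_cases hc : t[i] = a
    · have hget : t[i]? = some a := by rw [List.getElem?_eq_getElem hi, hc]
      by_cases hend : i + 1 = t.length
      · have hnil : t.drop (i + 1) = [] := by rw [hend]; simp
        rw [hnil]
        show (if t[i]? = some a then _ else _) = _
        rw [if_pos hget, if_pos hend, hc, pv_matchL_cons_eq]
        simp [pvMatchL]
      · have hi1 : i + 1 < t.length := by omega
        show (if t[i]? = some a then _ else _) = _
        rw [if_pos hget, if_neg hend, ih (i + 1) cnt hi1, hc, pv_matchL_cons_eq,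
          List.drop_eq_getElem_cons hi1]
    · have hget : ¬ (t[i]? = some a) := by rw [List.getElem?_eq_getElem hi]; simp [hc]
      show (if t[i]? = some a then _ else _) = _
      rw [if_neg hget, ih i cnt hi, pv_matchL_cons_ne hc, hdrop]

lemma pv_main (s t : List Char) (ht : t ≠ []) :
    ∀ (fuel pos : Nat) (cnt : Int), pos ≤ s.length → s.length - pos < fuel →
    pvLoopA t (s.drop pos) 0 cnt = pvOuterB s t fuel pos cnt := by
  intro fuel
  induction fuel with
  | zero => intro pos cnt h1 h2; omega
  | succ fuel ih =>
    intro pos cnt h1 h2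
    obtain ⟨c, tr, rfl⟩ := List.exists_cons_of_ne_nil ht
    have h0 : 0 < (c :: tr).length := by simp
    rw [pv_core (c :: tr) (s.drop pos) 0 cnt h0]
    simp only [pvOuterB]
    rw [pv_matchB_eq_matchL s (c :: tr) pos h1]
    simp only [List.drop_zero]
    cases hm : pvMatchL (s.drop pos) (c :: tr) with
    | none => simp
    | some r =>
      simp only [Option.map_some]
      have hsuf : r <:+ s := (pv_matchL_suffix _ _ _ hm).trans (List.drop_suffix _ _)
      have hrlen : r.length < (s.drop pos).length := pv_matchL_shrink _ _ _ _ hm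
      rw [List.length_drop] at hrlen
      have hdropr : s.drop (s.length - r.length) = r := (List.suffix_iff_eq_drop.mp hsuf).symm
      have := ih (s.length - r.length) (cnt + 1) (by omega) (by omega)
      rw [hdropr] at this
      exact this

lemma pv_lower_ne_nil (u : String) (h : u ≠ "") : (PySem.Str.lower u).toList ≠ [] := by
  rw [PySem.Str.toList_lower]
  simp [PySem.Chars.lower]
  simpa using h

-- ===== VERDICT (by name: the statement is the Claim_ definition above) =====
theorem contar_subcadena_spec : Claim_equal_contar_subcadena := by
  intro cadena subcadena _ hpre
  unfold Spec_contar_subcadena contar_subcadena contar_subcadena_alt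
  have htne : (PySem.Str.lower subcadena).toList ≠ [] := pv_lower_ne_nil subcadena hpre
  have h := pv_main (PySem.Str.lower cadena).toList (PySem.Str.lower subcadena).toList htne
    ((PySem.Str.lower cadena).toList.length + 1) 0 0 (by omega) (by omega)
  simpa using h
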